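-- pv_equiv track=rewrite | github.com/Shresht-Ahuja/Roadmint | loading.py | extract_steps
-- ===== SOURCE A (Python) =====
-- def extract_steps(text):
--     """Extract structured steps from roadmap text"""
--     steps = []
--     current_step = {}
--
--     for line in text.split('\n'):
--         line = line.strip()
--         if line.startswith('Step '):
--             if current_step:
--                 steps.append(current_step)
--             current_step = {'title': line}
--         elif line.startswith('Time: '):
--             current_step['time'] = line
--         elif line.startswith('Link: '):
--             current_step['link'] = line
--         elif line and 'title' in current_step and 'description' not in current_step:
--             current_step['description'] = line
--
--     if current_step:
--         steps.append(current_step)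
--
--     return steps
-- ===== SOURCE B (Python) =====
-- def extract_steps(text):
--     """Extract structured steps from roadmap text"""
--     lines = [ln.strip() for ln in text.split('\n')]
--
--     # cut into segments at each 'Step ' header (keep the leading segment)
--     segments = []
--     current = []
--     for ln in lines:
--         if ln.startswith('Step '):
--             segments.append(current)
--             current = [ln]
--         else:
--             current.append(ln)
--     segments.append(current)
--
--     def build(seg):
--         d = {}
--         for ln in seg:
--             if ln.startswith('Step '):
--                 d['title'] = ln
--             elif ln.startswith('Time: '):
--                 d['time'] = ln
--             elif ln.startswith('Link: '):
--                 d['link'] = ln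
--             elif ln and 'title' in d and 'description' not in d:
--                 d['description'] = ln
--         return d
--
--     return [d for d in map(build, segments) if d]
-- ===== Notes on version B (the rewrite author's own statement) =====
-- stated objective: alternative
-- what changed: B first cuts the stripped lines into segments at each step-header line, then builds each step dict independently with a helper and filters out empty dicts, instead of A's single pass with one persistent mutable dict and in-loop emission.
import Mathlib
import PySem

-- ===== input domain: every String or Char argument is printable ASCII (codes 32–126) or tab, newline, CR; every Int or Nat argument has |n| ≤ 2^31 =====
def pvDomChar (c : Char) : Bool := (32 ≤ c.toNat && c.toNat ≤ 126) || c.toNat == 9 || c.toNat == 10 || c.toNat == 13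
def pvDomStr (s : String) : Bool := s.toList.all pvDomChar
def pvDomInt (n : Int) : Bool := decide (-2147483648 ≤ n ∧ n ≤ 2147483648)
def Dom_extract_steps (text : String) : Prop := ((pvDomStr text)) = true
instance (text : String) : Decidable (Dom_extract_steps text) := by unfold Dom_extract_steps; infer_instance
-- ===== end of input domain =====

-- B cuts the lines into 'Step '-headed segments first and builds each step dict with a
-- helper, instead of A's single loop with a persistent dict; same values, alternative shape.

-- ===== PORT A =====
-- body of A's loop, applied to the already-stripped line
def pvStepBodyA (st : List (PySem.Dict String String) × PySem.Dict String String)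
    (line : String) : List (PySem.Dict String String) × PySem.Dict String String :=
  if PySem.Str.startswith line "Step " then
    ((if st.2.items.isEmpty then st.1 else st.1 ++ [st.2]),
      PySem.Dict.empty.insert "title" line)
  else if PySem.Str.startswith line "Time: " then (st.1, st.2.insert "time" line)
  else if PySem.Str.startswith line "Link: " then (st.1, st.2.insert "link" line)
  else if line ≠ "" ∧ st.2.contains "title" = true ∧ st.2.contains "description" = false then
    (st.1, st.2.insert "description" line)
  else st

def extract_steps (text : String) : List (List (String × String)) :=
  let st := ((PySem.Str.split? text "\n").getD []).foldl
    (fun st line0 => pvStepBodyA st (PySem.Str.strip line0)) ([], PySem.Dict.empty)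
  let steps := if st.2.items.isEmpty then st.1 else st.1 ++ [st.2]
  steps.map (·.items)

-- ===== PORT B =====
def pvBuildStepB (d : PySem.Dict String String) (ln : String) : PySem.Dict String String :=
  if PySem.Str.startswith ln "Step " then d.insert "title" ln
  else if PySem.Str.startswith ln "Time: " then d.insert "time" ln
  else if PySem.Str.startswith ln "Link: " then d.insert "link" ln
  else if ln ≠ "" ∧ d.contains "title" = true ∧ d.contains "description" = false then
    d.insert "description" ln
  else d

def pvBuildB (seg : List String) : PySem.Dict String String :=
  seg.foldl pvBuildStepB PySem.Dict.empty

def extract_steps_alt (text : String) : List (List (String × String)) :=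
  let lines := ((PySem.Str.split? text "\n").getD []).map PySem.Str.strip
  let st := lines.foldl
    (fun (p : List (List String) × List String) ln =>
      if PySem.Str.startswith ln "Step " then (p.1 ++ [p.2], [ln]) else (p.1, p.2 ++ [ln]))
    ([], [])
  let segments := st.1 ++ [st.2]
  ((segments.map pvBuildB).filter (fun d => !d.items.isEmpty)).map (·.items)

-- ===== PRECONDITION & SPEC =====
def Spec_extract_steps (text : String) (out : List (List (String × String))) : Prop := out = extract_steps_alt text
instance (text : String) (out : List (List (String × String))) : Decidable (Spec_extract_steps text out) := by unfold Spec_extract_steps; infer_instance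

-- ===== CLAIM (what is proved, stated in full; the proofs are below) =====
def Claim_equal_extract_steps : Prop := ∀ (text : String), Dom_extract_steps text → Spec_extract_steps text (extract_steps text)

-- ===== LEMMAS AND PROOFS =====

-- the dicts B's finished segments contribute
def pvEmitted (segs : List (List String)) : List (PySem.Dict String String) :=
  (segs.map pvBuildB).filter (fun d => !d.items.isEmpty)

def pvCutStep (p : List (List String) × List String) (ln : String) :
    List (List String) × List String :=
  if PySem.Str.startswith ln "Step " then (p.1 ++ [p.2], [ln]) else (p.1, p.2 ++ [ln])

theorem pvEmitted_append_singleton (segs : List (List String)) (cur : List String) :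
    pvEmitted (segs ++ [cur]) =
      if (pvBuildB cur).items.isEmpty then pvEmitted segs else pvEmitted segs ++ [pvBuildB cur] := by
  simp only [pvEmitted, List.map_append, List.filter_append, List.map_cons, List.map_nil,
    List.filter_cons, List.filter_nil]
  cases h : (pvBuildB cur).items.isEmpty <;> simp

theorem pvBuildB_snoc (cur : List String) (l : String) :
    pvBuildB (cur ++ [l]) = pvBuildStepB (pvBuildB cur) l := by
  simp [pvBuildB, List.foldl_append]

theorem pv_inv (ls : List String) (segs : List (List String)) (cur : List String) :
    ls.foldl pvStepBodyA (pvEmitted segs, pvBuildB cur)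
      = (pvEmitted ((ls.foldl pvCutStep (segs, cur)).1),
         pvBuildB ((ls.foldl pvCutStep (segs, cur)).2)) := by
  induction ls generalizing segs cur with
  | nil => rfl
  | cons l ls ih =>
    simp only [List.foldl_cons]
    cases hc : PySem.Str.startswith l "Step " with
    | true =>
      have hb : pvBuildB [l] = PySem.Dict.empty.insert "title" l := by
        simp only [pvBuildB, List.foldl_cons, List.foldl_nil, pvBuildStepB, hc, if_true]
      have hA : pvStepBodyA (pvEmitted segs, pvBuildB cur) l
          = (pvEmitted (segs ++ [cur]), pvBuildB [l]) := by
        rw [hb, pvEmitted_append_singleton]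
        simp only [pvStepBodyA, hc, if_true]
      have hC : pvCutStep (segs, cur) l = (segs ++ [cur], [l]) := by
        simp only [pvCutStep, hc, if_true]
      rw [hA, hC, ih]
    | false =>
      have hA : pvStepBodyA (pvEmitted segs, pvBuildB cur) l
          = (pvEmitted segs, pvBuildB (cur ++ [l])) := by
        rw [pvBuildB_snoc]
        simp only [pvStepBodyA, pvBuildStepB, hc, Bool.false_eq_true, if_false]
        split_ifs <;> rfl
      have hC : pvCutStep (segs, cur) l = (segs, cur ++ [l]) := by
        simp only [pvCutStep, hc, Bool.false_eq_true, if_false]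
      rw [hA, hC, ih]

-- ===== VERDICT (by name: the statement is the Claim_ definition above) =====
theorem extract_steps_spec : Claim_equal_extract_steps := by
  intro text _
  unfold Spec_extract_steps extract_steps extract_steps_alt
  have hmap : ((PySem.Str.split? text "\n").getD []).foldl
      (fun st line0 => pvStepBodyA st (PySem.Str.strip line0)) ([], PySem.Dict.empty)
      = (((PySem.Str.split? text "\n").getD []).map PySem.Str.strip).foldl pvStepBodyA
        ([], PySem.Dict.empty) := by
    rw [List.foldl_map]
  have h0 : (([], PySem.Dict.empty) : List (PySem.Dict String String) × PySem.Dict String String)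
      = (pvEmitted [], pvBuildB []) := rfl
  rw [hmap, h0, pv_inv]
  set ls := ((PySem.Str.split? text "\n").getD []).map PySem.Str.strip with hls
  have hfold : ls.foldl
      (fun (p : List (List String) × List String) ln =>
        if PySem.Str.startswith ln "Step " then (p.1 ++ [p.2], [ln]) else (p.1, p.2 ++ [ln]))
      ([], []) = ls.foldl pvCutStep ([], []) := rfl
  simp only [hfold]
  generalize ls.foldl pvCutStep ([], []) = st
  show (if (pvBuildB st.2).items.isEmpty then pvEmitted st.1
        else pvEmitted st.1 ++ [pvBuildB st.2]).map (fun x => x.items)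
      = (((st.1 ++ [st.2]).map pvBuildB).filter (fun d => !d.items.isEmpty)).map (fun x => x.items)
  rw [show ((st.1 ++ [st.2]).map pvBuildB).filter (fun d => !d.items.isEmpty)
        = pvEmitted (st.1 ++ [st.2]) from rfl,
    pvEmitted_append_singleton]
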